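-- pv_equiv track=rewrite | github.com/PratikGarai/Coding-Challenges | InterviewBit/MinimumLightsToActivate.py | solve
-- ===== SOURCE A (Python) =====
-- def solve(A, B):
--     le = len(A)
--     l = 0
--     ans = 0
--
--     while(l<le) :
--         ind = l
--         f = False
--         for i in range(l, min(l+B, le)) :
--             if A[i]==1:
--                 f = True
--                 ind = i
--
--         if not f :
--             f = False
--             for i in range(l, max(0, l-B), -1) :
--                 if A[i]==1:
--                     f = True
--                     ind = i
--                     break
--
--             if not f :
--                 return -1
--
--         l = ind + B
--         ans += 1
--
--     return ans
-- ===== SOURCE B (Python) =====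
-- def solve(A, B):
--     le = len(A)
--     lights = [i for i, x in enumerate(A) if x == 1]
--     n = len(lights)
--     l = 0
--     ans = 0
--     j = 0
--     while l < le:
--         best = -1
--         while j < n and lights[j] <= l + B - 1:
--             best = lights[j]
--             j += 1
--         if best < 0 or best < l - B + 1:
--             return -1
--         l = best + B
--         ans += 1
--     return ans
-- ===== Notes on version B (the rewrite author's own statement) =====
-- stated objective: alternative
-- what changed: B precomputes the list of light indices once and greedily walks it with a single advancing pointer per step, instead of rescanning a forward window and a backward window of A at every step.
import Mathlib
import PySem

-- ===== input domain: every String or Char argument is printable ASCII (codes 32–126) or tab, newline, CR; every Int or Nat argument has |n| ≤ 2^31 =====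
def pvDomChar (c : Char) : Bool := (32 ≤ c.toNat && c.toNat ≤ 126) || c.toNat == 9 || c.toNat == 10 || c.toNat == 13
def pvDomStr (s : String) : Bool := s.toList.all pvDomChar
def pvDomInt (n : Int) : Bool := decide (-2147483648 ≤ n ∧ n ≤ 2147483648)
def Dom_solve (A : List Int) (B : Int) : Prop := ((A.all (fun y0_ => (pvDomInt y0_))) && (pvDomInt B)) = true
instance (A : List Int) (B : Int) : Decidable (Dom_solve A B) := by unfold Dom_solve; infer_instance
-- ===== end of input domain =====

-- B replaces A's per-step forward+backward window rescans of A by one precomputed list of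
-- light indices walked left-to-right with a single advancing pointer (objective: alternative).

-- ===== PORT A =====
-- backward scan 'for i in range(l, max(0, l-B), -1): … break' (break = return first hit)
def pvBack (A : List Int) : List Int → Option Int
  | [] => none
  | i :: rest => if PySem.List.pyGet? A i = some 1 then some i else pvBack A rest

-- the 'while l < le' loop of A; fuel bounds the iteration count (l strictly increases
-- while l < le, so fuel = le + 1 is never exhausted)
def solveLoopA (A : List Int) (B le : Int) : Nat → Int → Int → Int
  | 0, _, _ => -1
  | fuel+1, l, ans =>
    if l < le then
      let fi := (PySem.List.pyRange l (min (l + B) le) 1).foldl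
        (fun st i => if PySem.List.pyGet? A i = some 1 then (true, i) else st) (false, l)
      if fi.1 then solveLoopA A B le fuel (fi.2 + B) (ans + 1)
      else
        match pvBack A (PySem.List.pyRange l (max 0 (l - B)) (-1)) with
        | some ind => solveLoopA A B le fuel (ind + B) (ans + 1)
        | none => -1
    else ans

def solve (A : List Int) (B : Int) : Int :=
  solveLoopA A B (A.length : Int) (A.length + 1) 0 0

-- ===== PORT B =====
-- lights = [i for i, x in enumerate(A) if x == 1]
def pvLights (A : List Int) : List Int :=
  ((PySem.List.enumerate A).filter (fun p => p.2 == 1)).map (fun p => p.1)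

-- inner 'while j < n and lights[j] <= thr: best = lights[j]; j += 1'
def pvAdv (P : List Int) (thr : Int) (j : Nat) (best : Int) : Nat × Int :=
  if h : j < P.length then
    if P[j] ≤ thr then pvAdv P thr (j + 1) P[j] else (j, best)
  else (j, best)
termination_by P.length - j

-- outer 'while l < le' loop of B, with the persistent pointer j
def solveLoopB (P : List Int) (B le : Int) : Nat → Int → Int → Nat → Int
  | 0, _, _, _ => -1
  | fuel+1, l, ans, j =>
    if l < le then
      let jb := pvAdv P (l + B - 1) j (-1)
      if jb.2 < 0 || jb.2 < l - B + 1 then -1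
      else solveLoopB P B le fuel (jb.2 + B) (ans + 1) jb.1
    else ans

def solve_alt (A : List Int) (B : Int) : Int :=
  solveLoopB (pvLights A) B (A.length : Int) (A.length + 1) 0 0 0

-- ===== PRECONDITION & SPEC =====
def Spec_solve (A : List Int) (B : Int) (out : Int) : Prop := out = solve_alt A B
instance (A : List Int) (B : Int) (out : Int) : Decidable (Spec_solve A B out) := by unfold Spec_solve; infer_instance

-- ===== CLAIM (what is proved, stated in full; the proofs are below) =====
def Claim_equal_solve : Prop := ∀ (A : List Int) (B : Int), Dom_solve A B → Spec_solve A B (solve A B)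

-- ===== LEMMAS AND PROOFS =====

-- proof-only reference: the greatest index i in [lo, hi) with A[i] == 1
def pvFmax (A : List Int) (lo hi : Int) : Option Int :=
  if h : lo < hi then
    if PySem.List.pyGet? A (hi - 1) = some 1 then some (hi - 1) else pvFmax A lo (hi - 1)
  else none
termination_by (hi - lo).toNat

lemma pvFmax_eq_none (A : List Int) (lo hi : Int)
    (h : ∀ i, lo ≤ i → i < hi → PySem.List.pyGet? A i ≠ some 1) :
    pvFmax A lo hi = none := by
  unfold pvFmax
  split
  next hlt =>
    rw [if_neg (h (hi - 1) (by omega) (by omega))]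
    exact pvFmax_eq_none A lo (hi - 1) (fun i h1 h2 => h i h1 (by omega))
  next => rfl
termination_by (hi - lo).toNat

lemma pvFmax_eq_some (A : List Int) (lo hi x : Int)
    (hlo : lo ≤ x) (hx : x < hi) (hA : PySem.List.pyGet? A x = some 1)
    (hmax : ∀ i, x < i → i < hi → PySem.List.pyGet? A i ≠ some 1) :
    pvFmax A lo hi = some x := by
  unfold pvFmax
  rw [dif_pos (by omega : lo < hi)]
  by_cases hh : PySem.List.pyGet? A (hi - 1) = some 1
  · rw [if_pos hh]
    have h1 : ¬ x < hi - 1 := fun hc => hmax (hi - 1) hc (by omega) hh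
    have h2 : x = hi - 1 := by omega
    rw [h2]
  · rw [if_neg hh]
    have hne : x ≠ hi - 1 := fun hc => hh (hc ▸ hA)
    exact pvFmax_eq_some A lo (hi - 1) x hlo (by omega) hA (fun i h1 h2 => hmax i h1 (by omega))
termination_by (hi - lo).toNat

-- A's forward scan computes pvFmax
lemma fwd_eq (A : List Int) (lo hi : Int) (st : Bool × Int) (h : lo ≤ hi) :
    (PySem.List.pyRange lo hi 1).foldl
      (fun st i => if PySem.List.pyGet? A i = some 1 then (true, i) else st) st
    = match pvFmax A lo hi with | some i => (true, i) | none => st := by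
  by_cases hlt : lo < hi
  · have hsplit : PySem.List.pyRange lo hi 1 = PySem.List.pyRange lo (hi - 1) 1 ++ [hi - 1] := by
      have h2 := PySem.List.pyRange_one_succ_right (a := lo) (b := hi - 1) (by omega)
      rw [show hi - 1 + 1 = hi from by omega] at h2
      exact h2
    rw [hsplit, List.foldl_append]
    simp only [List.foldl_cons, List.foldl_nil]
    unfold pvFmax
    rw [dif_pos hlt]
    by_cases hh : PySem.List.pyGet? A (hi - 1) = some 1
    · simp [hh]
    · simp only [hh, if_false]
      exact fwd_eq A lo (hi - 1) st (by omega)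
  · have hnil : PySem.List.pyRange lo hi 1 = [] := PySem.List.pyRange_one_eq_nil (by omega)
    unfold pvFmax
    rw [hnil, dif_neg hlt]
    rfl
termination_by (hi - lo).toNat

-- A's backward scan computes pvFmax on (lo, l]
lemma back_eq (A : List Int) (l lo : Int) (h : lo ≤ l) :
    pvBack A (PySem.List.pyRange l lo (-1)) = pvFmax A (lo + 1) (l + 1) := by
  by_cases hlt : lo < l
  · rw [PySem.List.pyRange_neg_one_cons (a := l) (b := lo) hlt]
    unfold pvBack
    by_cases hh : PySem.List.pyGet? A l = some 1
    · rw [if_pos hh]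
      unfold pvFmax
      rw [dif_pos (by omega)]
      simp only [add_sub_cancel_right]
      rw [if_pos hh]
    · rw [if_neg hh, back_eq A (l - 1) lo (by omega)]
      have hr : pvFmax A (lo + 1) (l + 1) = pvFmax A (lo + 1) l := by
        conv_lhs => unfold pvFmax
        rw [dif_pos (by omega)]
        simp only [add_sub_cancel_right]
        rw [if_neg hh]
      rw [show l - 1 + 1 = l from by omega, hr]
  · rw [PySem.List.pyRange_neg_one_eq_nil (by omega)]
    unfold pvFmax
    rw [dif_neg (by omega)]
    rfl
termination_by (l - lo).toNat

-- membership in the light list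
lemma mem_pvLights (A : List Int) (x : Int) :
    x ∈ pvLights A ↔ 0 ≤ x ∧ x < (A.length : Int) ∧ PySem.List.pyGet? A x = some 1 := by
  unfold pvLights
  simp only [List.mem_map, List.mem_filter, PySem.List.mem_enumerate_iff]
  constructor
  · rintro ⟨p, ⟨⟨k, hk, rfl⟩, hbeq⟩, rfl⟩
    simp only [beq_iff_eq] at hbeq
    refine ⟨by omega, by omega, ?_⟩
    simp only [zero_add]
    rw [PySem.List.pyGet?_natCast]
    simp [hk, hbeq]
  · rintro ⟨h0, hlt, hget⟩
    have hx : x = (x.toNat : Int) := by omega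
    rw [hx, PySem.List.pyGet?_natCast] at hget
    have hk : x.toNat < A.length := by omega
    rw [List.getElem?_eq_getElem hk] at hget
    refine ⟨(x, A[x.toNat]), ⟨⟨x.toNat, hk, by rw [zero_add]; exact Prod.ext (by omega) rfl⟩, ?_⟩, rfl⟩
    simpa using hget

lemma pairwise_pvLights (A : List Int) : (pvLights A).Pairwise (· < ·) := by
  unfold pvLights
  exact ((PySem.List.pairwise_lt_enumerate A 0).filter _).map _ (fun a b h => h)

lemma mem_getLastD {xs : List Int} (h : xs ≠ []) (d : Int) : xs.getLastD d ∈ xs := by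
  induction xs generalizing d with
  | nil => exact absurd rfl h
  | cons x rest ih =>
    rw [List.getLastD_cons]
    cases rest with
    | nil => simp
    | cons y t => exact List.mem_cons_of_mem _ (ih (by simp) x)

lemma sorted_le_getLastD {xs : List Int} (hs : xs.Pairwise (· < ·)) {p : Int}
    (hp : p ∈ xs) (d : Int) : p ≤ xs.getLastD d := by
  induction xs generalizing d with
  | nil => simp at hp
  | cons x rest ih =>
    rw [List.getLastD_cons]
    rcases List.mem_cons.mp hp with rfl | hpr
    · cases rest with
      | nil => simp
      | cons y t =>
        have := List.rel_of_pairwise_cons hs (mem_getLastD (xs := y :: t) (by simp) p)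
        omega
    · exact ih hs.of_cons hpr x

lemma mem_takeWhile_of_sorted {xs : List Int} (hs : xs.Pairwise (· < ·)) {p thr : Int}
    (hp : p ∈ xs) (hle : p ≤ thr) : p ∈ xs.takeWhile (fun x => x ≤ thr) := by
  induction xs with
  | nil => simp at hp
  | cons x rest ih =>
    by_cases hx : x ≤ thr
    · rw [List.takeWhile_cons_of_pos (by simpa using hx)]
      rcases List.mem_cons.mp hp with rfl | hpr
      · exact List.mem_cons_self
      · exact List.mem_cons_of_mem _ (ih hs.of_cons hpr)
    · rcases List.mem_cons.mp hp with rfl | hpr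
      · exact absurd hle hx
      · have := List.rel_of_pairwise_cons hs hpr; omega

-- the pointer advance in terms of takeWhile on the remaining suffix
lemma pvAdv_eq (P : List Int) (thr : Int) (j : Nat) (best : Int) :
    pvAdv P thr j best
    = (j + ((P.drop j).takeWhile (fun p => p ≤ thr)).length,
       ((P.drop j).takeWhile (fun p => p ≤ thr)).getLastD best) := by
  unfold pvAdv
  by_cases h : j < P.length
  · rw [dif_pos h, List.drop_eq_getElem_cons h]
    by_cases hle : P[j] ≤ thr
    · rw [if_pos hle, pvAdv_eq P thr (j + 1) P[j],
        List.takeWhile_cons_of_pos (by simpa using hle), List.getLastD_cons]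
      refine Prod.ext ?_ rfl
      simp; omega
    · rw [if_neg hle, List.takeWhile_cons_of_neg (by simpa using hle)]
      simp
  · rw [dif_neg h, List.drop_eq_nil_of_le (by omega)]
    simp
termination_by P.length - j

-- main simulation (B ≥ 1): both loops agree under the pointer invariant
lemma loop_eq (A : List Int) (B : Int) (hB : 1 ≤ B) (fuel : Nat) :
    ∀ (l ans : Int) (j : Nat),
      j ≤ (pvLights A).length →
      (∀ p ∈ (pvLights A).take j, p < l - B + 1) →
      (∀ p ∈ (pvLights A).drop j, l - B + 1 ≤ p) →
      (l = 0 ∨ B ≤ l) →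
      solveLoopA A B (A.length : Int) fuel l ans
        = solveLoopB (pvLights A) B (A.length : Int) fuel l ans j := by
  induction fuel with
  | zero => intro l ans j _ _ _ _; rfl
  | succ fuel ih =>
    intro l ans j hj htake hdrop hl0
    by_cases hlle : l < (A.length : Int)
    · have hl0' : 0 ≤ l := by rcases hl0 with h | h <;> omega
      set P := pvLights A with hP
      set run := (P.drop j).takeWhile (fun p => p ≤ l + B - 1) with hrun
      have hPdrop_pw : (P.drop j).Pairwise (· < ·) :=
        (pairwise_pvLights A).sublist (List.drop_sublist _ _)
      have hrun_pw : run.Pairwise (· < ·) := hPdrop_pw.sublist (List.takeWhile_prefix _).sublist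
      have hminpos : l ≤ min (l + B) (A.length : Int) := by omega
      -- light indices appearing anywhere in the step window are in the run
      have hwin : ∀ i, l - B + 1 ≤ i → i ≤ l + B - 1 → 0 ≤ i → i < (A.length : Int) →
          PySem.List.pyGet? A i = some 1 → i ∈ run := by
        intro i h1 h2 h3 h4 h5
        have hiP : i ∈ P := (mem_pvLights A i).mpr ⟨h3, h4, h5⟩
        rw [← List.take_append_drop j P, List.mem_append] at hiP
        rcases hiP with hit | hid
        · exact absurd (htake i hit) (by omega)
        · exact mem_takeWhile_of_sorted hPdrop_pw hid h2
      -- unfold one step on both sides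
      simp only [solveLoopA, solveLoopB, if_pos hlle]
      rw [pvAdv_eq, fwd_eq A l (min (l + B) (A.length : Int)) _ hminpos]
      rw [← hrun]
      by_cases hne : run = []
      · -- no usable light: both return -1
        have hnofwd : pvFmax A l (min (l + B) (A.length : Int)) = none := by
          apply pvFmax_eq_none
          intro i hi1 hi2 hget
          have : i ∈ run := hwin i (by omega) (by omega) (by omega) (by omega) hget
          simp [hne] at this
        have hlomax : max 0 (l - B) ≤ l := by omega
        have hnoback : pvFmax A (max 0 (l - B) + 1) (l + 1) = none := by
          apply pvFmax_eq_none
          intro i hi1 hi2 hget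
          have : i ∈ run := hwin i (by omega) (by omega) (by omega) (by omega) hget
          simp [hne] at this
        rw [hnofwd]
        simp only [hne, List.getLastD_nil]
        rw [back_eq A l (max 0 (l - B)) hlomax, hnoback]
        simp
      · -- a usable light exists: both advance identically
        have hbest_run : run.getLastD (-1) ∈ run := mem_getLastD hne _
        set best := run.getLastD (-1) with hbest
        have hbest_drop : best ∈ P.drop j := (List.takeWhile_prefix _).subset hbest_run
        have hbest_thr : best ≤ l + B - 1 := by
          have := List.mem_takeWhile_imp (hrun ▸ hbest_run)
          simpa using this
        have hbest_lb : l - B + 1 ≤ best := hdrop best hbest_drop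
        have hbestP := (mem_pvLights A best).mp (List.mem_of_mem_drop hbest_drop)
        obtain ⟨hb0, hblt, hbA⟩ := hbestP
        have hmaxrun : ∀ i, best < i → i ≤ l + B - 1 → i < (A.length : Int) →
            PySem.List.pyGet? A i ≠ some 1 := by
          intro i hi1 hi2 hi4 hget
          have : i ∈ run := hwin i (by omega) (by omega) (by omega) (by omega) hget
          have := sorted_le_getLastD hrun_pw this (-1)
          omega
        -- the B side takes the advance branch
        have hcond : (decide (best < 0) || decide (best < l - B + 1)) = false := by
          simp; omega
        -- the A side selects exactly best
        have hrec :
            solveLoopA A B (A.length : Int) fuel (best + B) (ans + 1)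
              = solveLoopB P B (A.length : Int) fuel (best + B) (ans + 1) (j + run.length) := by
          -- re-establish the invariant
          have hjle : j + run.length ≤ P.length := by
            have h1 := (List.takeWhile_prefix (l := P.drop j) (fun p => p ≤ l + B - 1)).length_le
            rw [← hrun] at h1
            have h2 : (P.drop j).length = P.length - j := List.length_drop ..
            omega
          have htk : P.take (j + run.length) = P.take j ++ run := by
            rw [List.take_add]
            congr 1
            rw [hrun]
            exact (List.prefix_iff_eq_take.mp (List.takeWhile_prefix _)).symm
          have hdd : P.drop j = run ++ P.drop (j + run.length) := by
            conv_lhs => rw [← List.take_append_drop run.length (P.drop j)]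
            rw [List.drop_drop]
            congr 1
            rw [hrun]
            exact (List.prefix_iff_eq_take.mp (List.takeWhile_prefix _)).symm
          apply ih (best + B) (ans + 1) (j + run.length) hjle
          · intro p hp
            rw [htk, List.mem_append] at hp
            rcases hp with hp | hp
            · have := htake p hp; omega
            · have := sorted_le_getLastD hrun_pw hp (-1); omega
          · intro p hp
            have hcross := (List.pairwise_append.mp (hdd ▸ hPdrop_pw)).2.2
            have := hcross best hbest_run p hp
            omega
          · right; omega
        by_cases hbl : l ≤ best
        · have hfwd : pvFmax A l (min (l + B) (A.length : Int)) = some best :=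
            pvFmax_eq_some A _ _ best hbl (by omega) hbA
              (fun i h1 h2 => hmaxrun i h1 (by omega) (by omega))
          rw [hfwd]
          simp only [hcond, Bool.false_eq_true, if_false, if_true]
          exact hrec
        · have hlB : B ≤ l := by
            rcases hl0 with h | h
            · exfalso; omega
            · exact h
          have hfwd : pvFmax A l (min (l + B) (A.length : Int)) = none := by
            apply pvFmax_eq_none
            intro i hi1 hi2 hget
            exact hmaxrun i (by omega) (by omega) (by omega) hget
          have hback : pvFmax A (max 0 (l - B) + 1) (l + 1) = some best := by
            rw [show max 0 (l - B) = l - B from by omega]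
            exact pvFmax_eq_some A _ _ best (by omega) (by omega) hbA
              (fun i h1 h2 => hmaxrun i h1 (by omega) (by omega))
          rw [hfwd]
          simp only [hcond, Bool.false_eq_true, if_false]
          rw [back_eq A l (max 0 (l - B)) (by omega), hback]
          exact hrec
    · simp only [solveLoopA, solveLoopB, if_neg hlle]

-- ===== VERDICT (by name: the statement is the Claim_ definition above) =====
theorem solve_spec : Claim_equal_solve := by
  intro A B _hdom
  unfold Spec_solve solve solve_alt
  by_cases hB : 1 ≤ B
  · apply loop_eq A B hB (A.length + 1) 0 0 0 (Nat.zero_le _)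
    · simp
    · intro p hp
      have := (mem_pvLights A p).mp (by simpa using hp)
      omega
    · exact Or.inl rfl
  · -- B ≤ 0: with a nonempty list neither side can place a light; both return -1
    cases A with
    | nil => rfl
    | cons a as =>
      have hle1 : (0 : Int) < ((a :: as).length : Int) := by
        simp only [List.length_cons]
        push_cast
        omega
      have h1 : PySem.List.pyRange 0 (min (0 + B) ((a :: as).length : Int)) 1 = [] :=
        PySem.List.pyRange_one_eq_nil (by omega)
      have h2 : PySem.List.pyRange 0 (max 0 (0 - B)) (-1) = [] :=
        PySem.List.pyRange_neg_one_eq_nil (by omega)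
      have hadv : pvAdv (pvLights (a :: as)) (0 + B - 1) 0 (-1) = (0, -1) := by
        unfold pvAdv
        split
        next h =>
          rw [if_neg]
          have hmem : (pvLights (a :: as))[0] ∈ pvLights (a :: as) := List.getElem_mem h
          have := (mem_pvLights _ _).mp hmem
          omega
        next => rfl
      simp only [solveLoopA, solveLoopB, if_pos hle1, h1, h2, hadv, List.foldl_nil, pvBack]
      norm_num
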